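-- pv_equiv track=rewrite | github.com/Bhaskar-Kurasala/pae_platform | frontend/tools/transform-v8-css.py | transform
-- ===== SOURCE A (Python) =====
-- def transform(css: str) -> str:
--     """Walk CSS as `selector{body}` chunks (handling nested @media via recursion)."""
--     out: list[str] = []
--     i = 0
--     n = len(css)
--     while i < n:
--         brace = css.find("{", i)
--         if brace == -1:
--             out.append(css[i:])
--             break
--         sel = css[i:brace]
--         depth = 1
--         j = brace + 1
--         while j < n and depth > 0:
--             ch = css[j]
--             if ch == "{":
--                 depth += 1
--             elif ch == "}":
--                 depth -= 1
--             j += 1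
--         body = css[brace + 1 : j - 1]
--         sel_stripped = sel.strip()
--
--         if sel_stripped.startswith("@media") or sel_stripped.startswith("@supports"):
--             # Recurse into media body
--             out.append(sel + "{" + transform(body) + "}")
--         elif sel_stripped.startswith("@keyframes"):
--             out.append(sel + "{" + body + "}")
--         else:
--             # Add `.dark` variant for any selector containing [data-theme="dark"]
--             if '[data-theme="dark"]' in sel:
--                 parts = [p.strip() for p in sel.split(",")]
--                 new_parts: list[str] = []
--                 for p in parts:
--                     new_parts.append(p)
--                     if '[data-theme="dark"]' in p:
--                         new_parts.append(p.replace('[data-theme="dark"]', ".dark"))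
--                 sel = ",\n".join(new_parts)
--             out.append(sel + "{" + body + "}")
--         i = j
--     return "".join(out)
-- ===== SOURCE B (Python) =====
-- DARK = '[data-theme="dark"]'
--
--
-- def _close_table(css: str) -> dict[int, int]:
--     """Stack-based brace pairing in one pass: maps each '{' index to the index
--     of the '}' that closes it; braces left open map to the last index n-1."""
--     close: dict[int, int] = {}
--     stack: list[int] = []
--     for idx, ch in enumerate(css):
--         if ch == "{":
--             stack.append(idx)
--         elif ch == "}" and stack:
--             close[stack.pop()] = idx
--     for b in stack:
--         close[b] = len(css) - 1
--     return close
--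
--
-- def transform(css: str) -> str:
--     close = _close_table(css)
--     out: list[str] = []
--     i = 0
--     while True:
--         brace = css.find("{", i)
--         if brace == -1:
--             out.append(css[i:])
--             break
--         sel = css[i:brace]
--         c = close[brace]
--         body = css[brace + 1 : c]
--         i = c + 1
--         s = sel.strip()
--         if s.startswith("@media") or s.startswith("@supports"):
--             out.append(sel + "{" + transform(body) + "}")
--         elif s.startswith("@keyframes"):
--             out.append(sel + "{" + body + "}")
--         else:
--             if DARK in sel:
--                 parts = [p.strip() for p in sel.split(",")]
--                 sel = ",\n".join(
--                     q
--                     for p in parts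
--                     for q in ([p, p.replace(DARK, ".dark")] if DARK in p else [p])
--                 )
--             out.append(sel + "{" + body + "}")
--     return "".join(out)
-- ===== Notes on version B (the rewrite author's own statement) =====
-- stated objective: alternative
-- what changed: A finds each chunk's closing brace by re-counting depth in an inner while loop at every chunk; B first builds a brace-matching table in one stack-based pass (each '{' index paired with the index of the '}' that closes it, unmatched braces paired with the last index) and the chunk walk then jumps directly through that table, with the .dark selector expansion done as a flat comprehension instead of an accumulator loop.
import Mathlib
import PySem

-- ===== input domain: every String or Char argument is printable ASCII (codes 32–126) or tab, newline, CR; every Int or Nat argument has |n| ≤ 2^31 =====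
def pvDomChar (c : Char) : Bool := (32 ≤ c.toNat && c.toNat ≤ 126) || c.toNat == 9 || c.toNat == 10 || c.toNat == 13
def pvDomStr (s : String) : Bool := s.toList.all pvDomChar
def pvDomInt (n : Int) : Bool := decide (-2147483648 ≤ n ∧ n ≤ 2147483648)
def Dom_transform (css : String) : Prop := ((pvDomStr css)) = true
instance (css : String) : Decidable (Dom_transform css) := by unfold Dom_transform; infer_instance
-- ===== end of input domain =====

-- B replaces A's on-the-fly depth-counting inner loop by a precomputed stack-based
-- brace-pairing table, through which the chunk walk then jumps (alternative algorithm, no speed claim).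

-- the literal '[data-theme="dark"]'
def darkL : List Char := "[data-theme=\"dark\"]".toList

-- ===== PORT A =====

-- A's depth update: depth += 1 on '{', depth -= 1 on '}'
def pvUpd (d : Int) (ch : Char) : Int :=
  if ch = '{' then d + 1 else if ch = '}' then d - 1 else d

-- A's inner `while j < n and depth > 0` loop, walked over the suffix css[brace+1:];
-- returns the number of characters consumed, i.e. j - (brace + 1)
def innerA : List Char → Int → Nat
  | [], _ => 0
  | ch :: rest, depth => if depth > 0 then innerA rest (pvUpd depth ch) + 1 else 0

-- A's outer `while i < n` loop, the position i represented by the suffix css[i:]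
def transformA (t : List Char) : List Char :=
  if ht : t = [] then []
  else
    let f := PySem.Chars.find t ['{']
    if f = -1 then t
    else
      let b := f.toNat
      let sel := t.take b
      let u := t.drop (b + 1)
      let k := innerA u 1
      let body := u.take (k - 1)
      let ss := PySem.Chars.strip sel
      let chunk :=
        if PySem.Chars.startswith ss "@media".toList || PySem.Chars.startswith ss "@supports".toList then
          sel ++ '{' :: transformA body ++ ['}']
        else if PySem.Chars.startswith ss "@keyframes".toList then
          sel ++ '{' :: body ++ ['}']
        else
          (if PySem.Chars.isIn darkL sel then
            PySem.Chars.join (",\n".toList)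
              (((PySem.Chars.splitOn sel [',']).map PySem.Chars.strip).foldl
                (fun acc p =>
                  (acc ++ [p]) ++
                    (if PySem.Chars.isIn darkL p then
                      [PySem.Chars.replace p darkL (".dark".toList)]
                    else [])) [])
          else sel) ++ '{' :: body ++ ['}']
      chunk ++ transformA (u.drop k)
termination_by t.length
decreasing_by
  · have h1 : 0 < t.length := List.length_pos_iff.mpr ht
    simp only [List.length_take, List.length_drop]
    omega
  · have h1 : 0 < t.length := List.length_pos_iff.mpr ht
    simp only [List.length_drop]
    omega

def transform (css : String) : String := String.ofList (transformA css.toList)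

-- ===== PORT B =====

-- B's `_close_table` loop body (`stack.append` pushes at the Lean list head = the Python list end)
def closeStep (acc : PySem.Dict Int Int × List Int) (p : Int × Char) : PySem.Dict Int Int × List Int :=
  if p.2 = '{' then (acc.1, p.1 :: acc.2)
  else if p.2 = '}' then
    match acc.2 with
    | [] => acc
    | b :: rest => (acc.1.insert b p.1, rest)
  else acc

-- B's `_close_table`; the trailing `for b in stack` runs bottom-to-top, i.e. over the reverse
def closeTable (t : List Char) : PySem.Dict Int Int :=
  let r := (PySem.List.enumerate t).foldl closeStep (PySem.Dict.empty, [])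
  r.2.reverse.foldl (fun d b => d.insert b ((t.length : Int) - 1)) r.1

-- lookup after a constant-value insert loop (used by the termination bound below)
theorem get?_foldl_insert_const (ks : List Int) (d : PySem.Dict Int Int) (v b : Int) :
    (ks.foldl (fun d k => d.insert k v) d).get? b = if b ∈ ks then some v else d.get? b := by
  induction ks generalizing d with
  | nil => simp
  | cons k ks ih =>
    simp only [List.foldl_cons, ih, List.mem_cons]
    by_cases hb : b ∈ ks
    · simp [hb]
    · by_cases hbk : b = k <;> simp [hb, hbk, PySem.Dict.get?_insert]

-- invariant of the close-table fold: dict values bound their keys, stack entries stay ≤ N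
theorem closeStep_bound : ∀ (l : List (Int × Char)) (d : PySem.Dict Int Int) (st : List Int) (N : Int),
    (∀ b c, d.get? b = some c → b ≤ c) → (∀ s ∈ st, ∀ p ∈ l, s ≤ p.1) → (∀ s ∈ st, s ≤ N) →
    (∀ p ∈ l, p.1 ≤ N) → l.Pairwise (fun p q => p.1 ≤ q.1) →
    (∀ b c, (l.foldl closeStep (d, st)).1.get? b = some c → b ≤ c) ∧
    (∀ s ∈ (l.foldl closeStep (d, st)).2, s ≤ N) := by
  intro l
  induction l with
  | nil => intro d st N h1 _ h3 _ _; exact ⟨h1, h3⟩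
  | cons p l ih =>
    intro d st N h1 h2 h3 h4 h5
    have hp5 := (List.pairwise_cons.mp h5)
    simp only [List.foldl_cons]
    by_cases hob : p.2 = '{'
    · simp only [closeStep, if_pos hob]
      refine ih d (p.1 :: st) N h1 ?_ ?_ (fun q hq => h4 q (List.mem_cons_of_mem _ hq)) hp5.2
      · intro s hs q hq
        rcases List.mem_cons.mp hs with rfl | hs
        · exact hp5.1 q hq
        · exact h2 s hs q (List.mem_cons_of_mem _ hq)
      · intro s hs
        rcases List.mem_cons.mp hs with rfl | hs
        · exact h4 p List.mem_cons_self
        · exact h3 s hs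
    · by_cases hcb : p.2 = '}'
      · simp only [closeStep, if_neg hob, if_pos hcb]
        cases st with
        | nil =>
          exact ih d [] N h1 (by simp) (by simp)
            (fun q hq => h4 q (List.mem_cons_of_mem _ hq)) hp5.2
        | cons b rest =>
          refine ih (d.insert b p.1) rest N ?_ ?_ ?_
            (fun q hq => h4 q (List.mem_cons_of_mem _ hq)) hp5.2
          · intro b' c' hbc
            rw [PySem.Dict.get?_insert] at hbc
            split at hbc
            · rename_i hb'; cases hbc
              exact hb' ▸ h2 b List.mem_cons_self p List.mem_cons_self
            · exact h1 b' c' hbc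
          · intro s hs q hq
            exact h2 s (List.mem_cons_of_mem _ hs) q (List.mem_cons_of_mem _ hq)
          · intro s hs; exact h3 s (List.mem_cons_of_mem _ hs)
      · simp only [closeStep, if_neg hob, if_neg hcb]
        exact ih d st N h1
          (fun s hs q hq => h2 s hs q (List.mem_cons_of_mem _ hq)) h3
          (fun q hq => h4 q (List.mem_cons_of_mem _ hq)) hp5.2

-- every value in the close table is ≥ its key (cited by goB's decreasing_by)
theorem closeTable_value_ge (t : List Char) (b c : Int)
    (h : (closeTable t).get? b = some c) : b ≤ c := by
  unfold closeTable at h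
  simp only at h
  set r := (PySem.List.enumerate t).foldl closeStep (PySem.Dict.empty, []) with hr
  have hbnd := closeStep_bound (PySem.List.enumerate t) PySem.Dict.empty [] ((t.length : Int) - 1)
    (by intro b c h; simp [PySem.Dict.get?_empty] at h)
    (by simp) (by simp)
    (by
      intro p hp
      rcases (PySem.List.mem_enumerate_iff t 0 p).mp hp with ⟨k, hk, rfl⟩
      simp only [Int.zero_add]
      omega)
    ((PySem.List.pairwise_lt_enumerate t 0).imp (fun h => le_of_lt h))
  rw [get?_foldl_insert_const] at h
  split at h
  · rename_i hmem
    cases h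
    exact le_trans (hbnd.2 b (List.mem_reverse.mp hmem)) (le_refl _)
  · exact hbnd.1 b c h

-- lookup bound used by goB's decreasing_by
theorem close_lookup_ge (t : List Char) (i b : Nat) (hib : i ≤ b) (hlen : i < t.length) :
    (i : Int) ≤ ((closeTable t).get? (b : Int)).getD ((t.length : Int) - 1) := by
  cases hg : (closeTable t).get? (b : Int) with
  | none => simp only [Option.getD_none]; omega
  | some c0 =>
    have := closeTable_value_ge t _ _ hg
    simp only [Option.getD_some]
    omega

-- if a '{' is found from position i, position i is inside the string (cited by goB's decreasing_by)
theorem find_brace_lt (t : List Char) (i : Nat)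
    (h : ¬ PySem.Chars.find (t.drop i) ['{'] = -1) : i < t.length := by
  by_contra hge
  have : t.drop i = [] := List.drop_eq_nil_of_le (by omega)
  rw [this] at h
  exact h ((PySem.Chars.find_eq_neg_one_iff [] ['{']).mpr (by simp))

-- B's `transform`: look the matching brace up in the table and jump; recursion only
-- into @media/@supports bodies (the table is the same value each iteration)
def goB (t : List Char) (i : Nat) : List Char :=
  let f := PySem.Chars.find (t.drop i) ['{']
  if hf : f = -1 then t.drop i
  else
    let brace := i + f.toNat
    -- `close[brace]`: the key is always present for a '{' (see closeTable_get below); c ≥ 0 always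
    let c := ((closeTable t).get? (brace : Int)).getD ((t.length : Int) - 1)
    let sel := (t.take brace).drop i
    let body := (t.take c.toNat).drop (brace + 1)
    let ss := PySem.Chars.strip sel
    let chunk :=
      if PySem.Chars.startswith ss "@media".toList || PySem.Chars.startswith ss "@supports".toList then
        sel ++ '{' :: goB body 0 ++ ['}']
      else if PySem.Chars.startswith ss "@keyframes".toList then
        sel ++ '{' :: body ++ ['}']
      else
        (if PySem.Chars.isIn darkL sel then
          PySem.Chars.join (",\n".toList)
            (((PySem.Chars.splitOn sel [',']).map PySem.Chars.strip).flatMap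
              (fun p =>
                if PySem.Chars.isIn darkL p then
                  [p, PySem.Chars.replace p darkL (".dark".toList)]
                else [p]))
        else sel) ++ '{' :: body ++ ['}']
    chunk ++ goB t (c.toNat + 1)
termination_by (t.length, t.length + 1 - i)
decreasing_by
  · have h1 : i < t.length := find_brace_lt t i hf
    apply Prod.Lex.left
    simp only [List.length_drop, List.length_take]
    omega
  · have h1 : i < t.length := find_brace_lt t i hf
    have h2 := close_lookup_ge t i (i + (PySem.Chars.find (t.drop i) ['{']).toNat) (by omega) h1
    apply Prod.Lex.right
    omega

def transform_alt (css : String) : String := String.ofList (goB css.toList 0)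

-- ===== PRECONDITION & SPEC =====
def Spec_transform (css : String) (out : String) : Prop := out = transform_alt css
instance (css : String) (out : String) : Decidable (Spec_transform css out) := by unfold Spec_transform; infer_instance

-- ===== CLAIM (what is proved, stated in full; the proofs are below) =====
def Claim_equal_transform : Prop := ∀ (css : String), Dom_transform css → Spec_transform css (transform css)

-- ===== LEMMAS AND PROOFS =====

theorem innerA_nonpos (u : List Char) (d : Int) (h : d ≤ 0) : innerA u d = 0 := by
  cases u with
  | nil => rfl
  | cons ch rest => simp [innerA]; omega

-- whether A's inner loop terminates because the depth reached 0 (vs the end of input)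
def closesD : List Char → Int → Bool
  | [], d => decide (d ≤ 0)
  | ch :: rest, d => if d ≤ 0 then true else closesD rest (pvUpd d ch)

theorem closesD_nonpos (u : List Char) (d : Int) (h : d ≤ 0) : closesD u d = true := by
  cases u with
  | nil => simp [closesD]; omega
  | cons ch rest => simp [closesD]; omega

theorem innerA_le (u : List Char) : ∀ (d : Int), innerA u d ≤ u.length := by
  induction u with
  | nil => intro d; simp [innerA]
  | cons ch rest ih =>
    intro d
    simp only [innerA, List.length_cons]
    split
    · have := ih (pvUpd d ch); omega
    · omega

theorem innerA_of_not_closes (u : List Char) : ∀ (d : Int), 0 < d → closesD u d = false →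
    innerA u d = u.length := by
  induction u with
  | nil => intro d _ _; rfl
  | cons ch rest ih =>
    intro d hd hc
    simp only [closesD, if_neg (by omega : ¬ d ≤ 0)] at hc
    have hupd : 0 < pvUpd d ch := by
      by_contra hnp
      simp [closesD_nonpos rest (pvUpd d ch) (by omega)] at hc
    simp only [innerA, if_pos hd, List.length_cons]
    rw [ih (pvUpd d ch) hupd hc]

-- net depth change of a segment
def runD (d : Int) (u : List Char) : Int := u.foldl pvUpd d

theorem runD_nil (d : Int) : runD d [] = d := rfl

theorem runD_snoc (d : Int) (u : List Char) (c : Char) :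
    runD d (u ++ [c]) = pvUpd (runD d u) c := by
  simp [runD]

theorem closesD_append (u : List Char) : ∀ (v : List Char) (d : Int),
    closesD (u ++ v) d = (closesD u d || closesD v (runD d u)) := by
  induction u with
  | nil =>
    intro v d
    simp only [List.nil_append, closesD, runD_nil]
    by_cases h : d ≤ 0
    · simp [h, closesD_nonpos v d h]
    · simp [h]
  | cons ch rest ih =>
    intro v d
    by_cases h : d ≤ 0
    · simp [closesD, h]
    · simp only [List.cons_append, closesD, if_neg h, ih, runD, List.foldl_cons]

theorem innerA_append (u : List Char) : ∀ (v : List Char) (d : Int),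
    innerA (u ++ v) d = if closesD u d = true then innerA u d else u.length + innerA v (runD d u) := by
  induction u with
  | nil =>
    intro v d
    simp only [List.nil_append, closesD, runD_nil, List.length_nil]
    by_cases h : d ≤ 0
    · simp [h, innerA_nonpos v d h, innerA]
    · simp [h]
  | cons ch rest ih =>
    intro v d
    by_cases h : d ≤ 0
    · simp [closesD, h, innerA, not_lt.mpr h, innerA_nonpos]
    · simp only [List.cons_append, innerA, if_pos (by omega : d > 0), ih, closesD, if_neg h,
        List.length_cons, runD, List.foldl_cons]
      split
      · rfl
      · omega

theorem runD_pos_of_not_closes (u : List Char) : ∀ (d : Int), 0 < d → closesD u d = false →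
    0 < runD d u := by
  induction u with
  | nil => intro d hd _; simpa [runD_nil]
  | cons ch rest ih =>
    intro d hd hc
    simp only [closesD, if_neg (by omega : ¬ d ≤ 0)] at hc
    have hupd : 0 < pvUpd d ch := by
      by_contra hnp
      simp [closesD_nonpos rest (pvUpd d ch) (by omega)] at hc
    exact ih (pvUpd d ch) hupd hc

-- the slice t[a:m]
def seg (t : List Char) (a m : Nat) : List Char := (t.take m).drop a

theorem seg_snoc (t : List Char) (a m : Nat) (ha : a ≤ m) (hm : m < t.length) :
    seg t a (m + 1) = seg t a m ++ [t[m]] := by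
  unfold seg
  rw [List.take_succ, List.getElem?_eq_getElem hm]
  simp only [Option.toList_some]
  rw [List.drop_append]
  have : a - (t.take m).length = 0 := by simp; omega
  rw [this]
  simp

theorem seg_self (t : List Char) (m : Nat) : seg t m m = [] := by
  unfold seg
  apply List.drop_eq_nil_of_le
  simp

theorem drop_eq_seg_append (t : List Char) (a m : Nat) (ha : a ≤ m) (hm : m ≤ t.length) :
    t.drop a = seg t a m ++ t.drop m := by
  unfold seg
  conv_lhs => rw [← List.take_append_drop m t]
  rw [List.drop_append]
  have : a - (t.take m).length = 0 := by simp; omega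
  rw [this]
  simp

-- the spec stack of still-open braces (top first) after scanning m characters
def openSt (t : List Char) : Nat → List Nat
  | 0 => []
  | m + 1 =>
    if t[m]? = some '{' then m :: openSt t m
    else if t[m]? = some '}' then (openSt t m).tail
    else openSt t m


theorem seg_length (t : List Char) (a m : Nat) (ha : a ≤ m) (hm : m ≤ t.length) :
    (seg t a m).length = m - a := by
  simp [seg]; omega

theorem pvUpd_open (r : Int) : pvUpd r '{' = r + 1 := by simp [pvUpd]
theorem pvUpd_close (r : Int) : pvUpd r '}' = r - 1 := by simp [pvUpd]
theorem pvUpd_other (r : Int) (c : Char) (h1 : c ≠ '{') (h2 : c ≠ '}') : pvUpd r c = r := by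
  simp [pvUpd, h1, h2]

theorem closesD_single_pos (c : Char) (r : Int) (hr : 0 < r) :
    closesD [c] r = decide (pvUpd r c ≤ 0) := by
  have h : ¬ r ≤ 0 := by omega
  show (if r ≤ 0 then true else closesD [] (pvUpd r c)) = decide (pvUpd r c ≤ 0)
  rw [if_neg h]
  rfl

theorem mem_getElem? {b : Nat} {l : List Nat} (h : b ∈ l) : ∃ j : Nat, l[j]? = some b := by
  obtain ⟨j, hj, rfl⟩ := List.getElem_of_mem h
  exact ⟨j, List.getElem?_eq_getElem hj⟩

-- full invariant of the close-table fold after m characters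
theorem closeInv (t : List Char) : ∀ (m : Nat), m ≤ t.length →
    (((PySem.List.enumerate t).take m).foldl closeStep (PySem.Dict.empty, [])).2
      = (openSt t m).map (fun b : Nat => (b : Int)) ∧
    (∀ (j b : Nat), (openSt t m)[j]? = some b → t[b]? = some '{' ∧ b < m ∧
        closesD (seg t (b + 1) m) 1 = false ∧ runD 1 (seg t (b + 1) m) = (j : Int) + 1) ∧
    (∀ (b : Nat), b < m → t[b]? = some '{' → closesD (seg t (b + 1) m) 1 = true →
        (((PySem.List.enumerate t).take m).foldl closeStep (PySem.Dict.empty, [])).1.get? (b : Int)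
          = some ((b : Int) + (innerA (t.drop (b + 1)) 1 : Nat))) ∧
    (∀ (b : Nat), b < m → t[b]? = some '{' → closesD (seg t (b + 1) m) 1 = false →
        b ∈ openSt t m) := by
  intro m
  induction m with
  | zero =>
    intro _
    refine ⟨by simp [openSt], ?_, ?_, ?_⟩
    · intro j b h; simp [openSt] at h
    · intro b hb; omega
    · intro b hb; omega
  | succ m ih =>
    intro hm1
    have hm : m < t.length := by omega
    obtain ⟨ih1, ih2, ih3, ih4⟩ := ih (by omega)
    have hgm : t[m]? = some t[m] := List.getElem?_eq_getElem hm
    have hE : (PySem.List.enumerate t).take (m + 1)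
        = (PySem.List.enumerate t).take m ++ [((m : Int), t[m])] := by
      rw [List.take_succ, PySem.List.getElem?_enumerate, List.getElem?_eq_getElem hm]
      simp
    have hstep : ((PySem.List.enumerate t).take (m + 1)).foldl closeStep (PySem.Dict.empty, [])
        = closeStep (((PySem.List.enumerate t).take m).foldl closeStep (PySem.Dict.empty, []))
            ((m : Int), t[m]) := by
      rw [hE, List.foldl_append, List.foldl_cons, List.foldl_nil]
    rw [hstep]
    -- the trace of the depth counter for still-open braces, after one more character
    by_cases hob : t[m] = '{'
    · -- push
      have hopen : openSt t (m + 1) = m :: openSt t m := by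
        simp [openSt, hgm, hob]
      have hst : (closeStep (((PySem.List.enumerate t).take m).foldl closeStep
          (PySem.Dict.empty, [])) ((m : Int), t[m]))
          = ((((PySem.List.enumerate t).take m).foldl closeStep (PySem.Dict.empty, [])).1,
             (m : Int) :: (((PySem.List.enumerate t).take m).foldl closeStep (PySem.Dict.empty, [])).2) := by
        simp [closeStep, hob]
      rw [hst, hopen]
      refine ⟨by simp [ih1], ?_, ?_, ?_⟩
      · intro j b hj
        match j with
        | 0 =>
          simp only [List.getElem?_cons_zero, Option.some_inj] at hj
          subst hj
          refine ⟨by rw [hgm, hob], by omega, ?_, ?_⟩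
          · rw [seg_self]; simp [closesD]
          · rw [seg_self]; simp [runD]
        | j + 1 =>
          simp only [List.getElem?_cons_succ] at hj
          obtain ⟨h1, h2, h3, h4⟩ := ih2 j b hj
          have hseg : seg t (b + 1) (m + 1) = seg t (b + 1) m ++ ['{'] := by
            rw [seg_snoc t (b + 1) m (by omega) hm, hob]
          refine ⟨h1, by omega, ?_, ?_⟩
          · rw [hseg, closesD_append, h3, h4, closesD_single_pos _ _ (by omega), pvUpd_open]
            simp; omega
          · rw [hseg, runD_snoc, h4, pvUpd_open]
            push_cast; ring
      · intro b hb hbrace hcl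
        rcases Nat.lt_succ_iff_lt_or_eq.mp hb with hb' | rfl
        · have hseg : seg t (b + 1) (m + 1) = seg t (b + 1) m ++ ['{'] := by
            rw [seg_snoc t (b + 1) m (by omega) hm, hob]
          rw [hseg, closesD_append] at hcl
          by_cases hcm : closesD (seg t (b + 1) m) 1 = true
          · exact ih3 b hb' hbrace hcm
          · exfalso
            have hpos := runD_pos_of_not_closes (seg t (b + 1) m) 1 (by omega)
              (Bool.not_eq_true _ ▸ hcm)
            rw [Bool.eq_false_iff.mpr hcm, closesD_single_pos _ _ hpos, pvUpd_open] at hcl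
            simp at hcl
            omega
        · exfalso
          rw [seg_self] at hcl
          simp [closesD] at hcl
      · intro b hb hbrace hop
        rcases Nat.lt_succ_iff_lt_or_eq.mp hb with hb' | rfl
        · have hseg : seg t (b + 1) (m + 1) = seg t (b + 1) m ++ ['{'] := by
            rw [seg_snoc t (b + 1) m (by omega) hm, hob]
          rw [hseg, closesD_append] at hop
          have hcm : closesD (seg t (b + 1) m) 1 = false := by
            rcases Bool.or_eq_false_iff.mp hop with ⟨h, _⟩; exact h
          exact List.mem_cons_of_mem _ (ih4 b hb' hbrace hcm)
        · exact List.mem_cons_self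
    · by_cases hcb : t[m] = '}'
      · -- pop
        have hopen : openSt t (m + 1) = (openSt t m).tail := by
          simp [openSt, hgm, hob, hcb]
        cases hso : openSt t m with
        | nil =>
          have hst : (closeStep (((PySem.List.enumerate t).take m).foldl closeStep
              (PySem.Dict.empty, [])) ((m : Int), t[m]))
              = (((PySem.List.enumerate t).take m).foldl closeStep (PySem.Dict.empty, [])) := by
            have : (((PySem.List.enumerate t).take m).foldl closeStep (PySem.Dict.empty, [])).2 = [] := by
              rw [ih1, hso]; rfl
            simp [closeStep, hob, hcb, this]
          rw [hst, hopen, hso]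
          refine ⟨by rw [ih1, hso]; rfl, ?_, ?_, ?_⟩
          · intro j b hj; simp at hj
          · intro b hb hbrace hcl
            rcases Nat.lt_succ_iff_lt_or_eq.mp hb with hb' | rfl
            · have hseg : seg t (b + 1) (m + 1) = seg t (b + 1) m ++ ['}'] := by
                rw [seg_snoc t (b + 1) m (by omega) hm, hcb]
              rw [hseg, closesD_append] at hcl
              by_cases hcm : closesD (seg t (b + 1) m) 1 = true
              · exact ih3 b hb' hbrace hcm
              · exfalso
                have := ih4 b hb' hbrace (Bool.not_eq_true _ ▸ hcm)
                rw [hso] at this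
                simp at this
            · exfalso
              rw [hbrace] at hgm
              simp [hcb] at hgm
          · intro b hb hbrace hop
            exfalso
            rcases Nat.lt_succ_iff_lt_or_eq.mp hb with hb' | rfl
            · have hseg : seg t (b + 1) (m + 1) = seg t (b + 1) m ++ ['}'] := by
                rw [seg_snoc t (b + 1) m (by omega) hm, hcb]
              rw [hseg, closesD_append] at hop
              have hcm : closesD (seg t (b + 1) m) 1 = false := by
                rcases Bool.or_eq_false_iff.mp hop with ⟨h, _⟩; exact h
              have := ih4 b hb' hbrace hcm
              rw [hso] at this
              simp at this
            · rw [hbrace] at hgm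
              simp [hcb] at hgm
        | cons c1 restN =>
          obtain ⟨hc1brace, hc1lt, hc1op, hc1run⟩ := ih2 0 c1 (by rw [hso]; rfl)
          have hc1closed : closesD (seg t (c1 + 1) (m + 1)) 1 = true := by
            have hseg : seg t (c1 + 1) (m + 1) = seg t (c1 + 1) m ++ ['}'] := by
              rw [seg_snoc t (c1 + 1) m (by omega) hm, hcb]
            rw [hseg, closesD_append, hc1op, hc1run, closesD_single_pos _ _ (by omega), pvUpd_close]
            simp
          have hval : ((c1 : Int) + (innerA (t.drop (c1 + 1)) 1 : Nat)) = (m : Int) := by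
            have hdecomp : t.drop (c1 + 1) = seg t (c1 + 1) m ++ (t[m] :: t.drop (m + 1)) := by
              rw [← List.drop_eq_getElem_cons hm]
              exact drop_eq_seg_append t (c1 + 1) m (by omega) (by omega)
            rw [hdecomp, innerA_append, hc1op]
            simp only [Bool.false_eq_true, if_false]
            rw [hc1run]
            simp only [Nat.cast_zero, zero_add]
            have : innerA (t[m] :: t.drop (m + 1)) 1 = 1 := by
              rw [hcb]
              simp only [innerA, pvUpd_close]
              rw [if_pos (by omega)]
              rw [innerA_nonpos _ _ (by omega)]
            rw [this, seg_length t (c1 + 1) m (by omega) (by omega)]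
            push_cast
            omega
          have hst : (closeStep (((PySem.List.enumerate t).take m).foldl closeStep
              (PySem.Dict.empty, [])) ((m : Int), t[m]))
              = ((((PySem.List.enumerate t).take m).foldl closeStep
                   (PySem.Dict.empty, [])).1.insert (c1 : Int) (m : Int),
                 restN.map (fun b : Nat => (b : Int))) := by
            have h2 : (((PySem.List.enumerate t).take m).foldl closeStep (PySem.Dict.empty, [])).2
                = (c1 : Int) :: restN.map (fun b : Nat => (b : Int)) := by
              rw [ih1, hso]; rfl
            simp [closeStep, hob, hcb, h2]
          rw [hst, hopen, hso]
          refine ⟨rfl, ?_, ?_, ?_⟩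
          · intro j b hj
            simp only [List.tail_cons] at hj
            obtain ⟨h1, h2, h3, h4⟩ := ih2 (j + 1) b (by rw [hso]; simpa using hj)
            have hseg : seg t (b + 1) (m + 1) = seg t (b + 1) m ++ ['}'] := by
              rw [seg_snoc t (b + 1) m (by omega) hm, hcb]
            refine ⟨h1, by omega, ?_, ?_⟩
            · rw [hseg, closesD_append, h3, h4, closesD_single_pos _ _ (by push_cast; omega),
                pvUpd_close]
              simp only [Bool.false_or, decide_eq_false_iff_not]
              push_cast
              omega
            · rw [hseg, runD_snoc, h4, pvUpd_close]
              push_cast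
              ring
          · intro b hb hbrace hcl
            by_cases hbc1 : b = c1
            · subst hbc1
              rw [PySem.Dict.get?_insert_self, hval]
            · rcases Nat.lt_succ_iff_lt_or_eq.mp hb with hb' | rfl
              · have hseg : seg t (b + 1) (m + 1) = seg t (b + 1) m ++ ['}'] := by
                  rw [seg_snoc t (b + 1) m (by omega) hm, hcb]
                rw [hseg, closesD_append] at hcl
                by_cases hcm : closesD (seg t (b + 1) m) 1 = true
                · rw [PySem.Dict.get?_insert_of_ne _ _ (by
                    intro h
                    exact hbc1 (Nat.cast_injective h))]
                  exact ih3 b hb' hbrace hcm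
                · exfalso
                  have hmem := ih4 b hb' hbrace (Bool.not_eq_true _ ▸ hcm)
                  rw [hso] at hmem
                  rcases List.mem_cons.mp hmem with rfl | hmem
                  · exact hbc1 rfl
                  · obtain ⟨j, hj⟩ := mem_getElem? hmem
                    obtain ⟨_, _, _, h4⟩ := ih2 (j + 1) b (by rw [hso]; simpa using hj)
                    rw [Bool.eq_false_iff.mpr hcm, closesD_single_pos _ _ (by rw [h4]; push_cast; omega),
                      pvUpd_close, h4] at hcl
                    simp at hcl
                    omega
              · exfalso
                rw [hbrace] at hgm
                simp [hcb] at hgm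
          · intro b hb hbrace hop
            rcases Nat.lt_succ_iff_lt_or_eq.mp hb with hb' | rfl
            · have hseg : seg t (b + 1) (m + 1) = seg t (b + 1) m ++ ['}'] := by
                rw [seg_snoc t (b + 1) m (by omega) hm, hcb]
              rw [hseg, closesD_append] at hop
              have hcm : closesD (seg t (b + 1) m) 1 = false := by
                rcases Bool.or_eq_false_iff.mp hop with ⟨h, _⟩; exact h
              have hmem := ih4 b hb' hbrace hcm
              rw [hso] at hmem
              rcases List.mem_cons.mp hmem with rfl | hmem
              · exfalso
                rw [hc1run] at hop
                rw [closesD_single_pos _ _ (by omega), pvUpd_close] at hop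
                simp at hop
              · simpa using hmem
            · exfalso
              rw [hbrace] at hgm
              simp [hcb] at hgm
      · -- ordinary character
        have hopen : openSt t (m + 1) = openSt t m := by
          simp [openSt, hgm, hob, hcb]
        have hst : (closeStep (((PySem.List.enumerate t).take m).foldl closeStep
            (PySem.Dict.empty, [])) ((m : Int), t[m]))
            = (((PySem.List.enumerate t).take m).foldl closeStep (PySem.Dict.empty, [])) := by
          simp [closeStep, hob, hcb]
        rw [hst, hopen]
        refine ⟨ih1, ?_, ?_, ?_⟩
        · intro j b hj
          obtain ⟨h1, h2, h3, h4⟩ := ih2 j b hj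
          have hseg : seg t (b + 1) (m + 1) = seg t (b + 1) m ++ [t[m]] :=
            seg_snoc t (b + 1) m (by omega) hm
          refine ⟨h1, by omega, ?_, ?_⟩
          · rw [hseg, closesD_append, h3, h4, closesD_single_pos _ _ (by push_cast; omega),
              pvUpd_other _ _ hob hcb]
            simp only [Bool.false_or, decide_eq_false_iff_not]
            push_cast
            omega
          · rw [hseg, runD_snoc, h4, pvUpd_other _ _ hob hcb]
        · intro b hb hbrace hcl
          rcases Nat.lt_succ_iff_lt_or_eq.mp hb with hb' | rfl
          · have hseg : seg t (b + 1) (m + 1) = seg t (b + 1) m ++ [t[m]] :=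
              seg_snoc t (b + 1) m (by omega) hm
            rw [hseg, closesD_append] at hcl
            by_cases hcm : closesD (seg t (b + 1) m) 1 = true
            · exact ih3 b hb' hbrace hcm
            · exfalso
              have hpos := runD_pos_of_not_closes (seg t (b + 1) m) 1 (by omega)
                (Bool.not_eq_true _ ▸ hcm)
              rw [Bool.eq_false_iff.mpr hcm, closesD_single_pos _ _ hpos,
                pvUpd_other _ _ hob hcb] at hcl
              simp at hcl
              omega
          · exfalso
            rw [hbrace] at hgm
            simp at hgm
            exact hob hgm.symm
        · intro b hb hbrace hop
          rcases Nat.lt_succ_iff_lt_or_eq.mp hb with hb' | rfl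
          · have hseg : seg t (b + 1) (m + 1) = seg t (b + 1) m ++ [t[m]] :=
              seg_snoc t (b + 1) m (by omega) hm
            rw [hseg, closesD_append] at hop
            have hcm : closesD (seg t (b + 1) m) 1 = false := by
              rcases Bool.or_eq_false_iff.mp hop with ⟨h, _⟩; exact h
            exact ih4 b hb' hbrace hcm
          · exfalso
            rw [hbrace] at hgm
            simp at hgm
            exact hob hgm.symm

-- the close table maps every '{' at index b to b + innerA(css[b+1:], 1)
theorem closeTable_get (t : List Char) (b : Nat) (hb : t[b]? = some '{') :
    (closeTable t).get? (b : Int) = some ((b : Int) + (innerA (t.drop (b + 1)) 1 : Nat)) := by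
  have hbl : b < t.length := by
    by_contra h
    rw [List.getElem?_eq_none (by omega)] at hb
    cases hb
  obtain ⟨inv1, inv2, inv3, inv4⟩ := closeInv t t.length le_rfl
  have htake : (PySem.List.enumerate t).take t.length = PySem.List.enumerate t := by
    apply List.take_of_length_le
    rw [PySem.List.length_enumerate]
  rw [htake] at inv1 inv3
  have hseg : seg t (b + 1) t.length = t.drop (b + 1) := by
    unfold seg
    rw [List.take_length]
  unfold closeTable
  simp only []
  rw [get?_foldl_insert_const]
  by_cases hcl : closesD (t.drop (b + 1)) 1 = true
  · rw [if_neg ?_]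
    · exact inv3 b hbl hb (by rw [hseg]; exact hcl)
    · intro hmem
      rw [List.mem_reverse, inv1, List.mem_map] at hmem
      obtain ⟨a, hamem, ha⟩ := hmem
      have hab : a = b := Nat.cast_injective ha
      subst hab
      obtain ⟨j, hj⟩ := mem_getElem? hamem
      obtain ⟨-, -, hopn, -⟩ := inv2 j a hj
      rw [hseg, hcl] at hopn
      cases hopn
  · rw [if_pos ?_]
    · congr 1
      have hlen := innerA_of_not_closes (t.drop (b + 1)) 1 (by omega)
        (Bool.not_eq_true _ ▸ hcl)
      rw [hlen, List.length_drop]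
      push_cast
      omega
    · rw [List.mem_reverse, inv1, List.mem_map]
      exact ⟨b, inv4 b hbl hb (by rw [hseg]; exact Bool.not_eq_true _ ▸ hcl), rfl⟩

-- A's dark-variant fold computes B's flatMap
theorem expand_fold_eq (parts : List (List Char)) : ∀ (acc : List (List Char)),
    parts.foldl (fun acc p => (acc ++ [p]) ++
        (if PySem.Chars.isIn darkL p then [PySem.Chars.replace p darkL (".dark".toList)] else []))
      acc
    = acc ++ parts.flatMap (fun p =>
        if PySem.Chars.isIn darkL p then [p, PySem.Chars.replace p darkL (".dark".toList)]
        else [p]) := by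
  induction parts with
  | nil => intro acc; simp
  | cons p ps ih =>
    intro acc
    rw [List.foldl_cons, ih, List.flatMap_cons]
    by_cases hp : PySem.Chars.isIn darkL p = true
    · simp [hp]
    · simp [hp]

-- B's table-driven walk from i computes A's loop on the suffix
theorem goB_eq (N : Nat) : ∀ (t : List Char), t.length ≤ N → ∀ (k i : Nat),
    t.length - i ≤ k → goB t i = transformA (t.drop i) := by
  induction N with
  | zero =>
    intro t ht k i _
    have htn : t = [] := List.length_eq_zero_iff.mp (by omega)
    subst htn
    rw [goB]
    have hf : PySem.Chars.find (([] : List Char).drop i) ['{'] = -1 := by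
      rw [List.drop_nil]
      exact (PySem.Chars.find_eq_neg_one_iff [] ['{']).mpr (by simp)
    rw [dif_pos hf, List.drop_nil, transformA]
    simp
  | succ N ihN =>
    intro t ht k
    induction k with
    | zero =>
      intro i hik
      have hdr : t.drop i = [] := List.drop_eq_nil_of_le (by omega)
      have hf : PySem.Chars.find (t.drop i) ['{'] = -1 := by
        rw [hdr]
        exact (PySem.Chars.find_eq_neg_one_iff [] ['{']).mpr (by simp)
      rw [goB, dif_pos hf, hdr, transformA]
      simp
    | succ k ihk =>
      intro i hik
      by_cases hf : PySem.Chars.find (t.drop i) ['{'] = -1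
      · rw [goB, dif_pos hf, transformA]
        by_cases hdr : t.drop i = []
        · rw [dif_pos hdr, hdr]
        · rw [dif_neg hdr]
          simp [hf]
      · have hil : i < t.length := find_brace_lt t i hf
        have h0 : (0 : Int) ≤ PySem.Chars.find (t.drop i) ['{'] := by
          have := PySem.Chars.neg_one_le_find (s := t.drop i) (sub := ['{'])
          omega
        obtain ⟨hpref, -⟩ := PySem.Chars.find_spec h0
        obtain ⟨u0, hu0⟩ := hpref
        have hdropbr : t.drop (i + (PySem.Chars.find (t.drop i) ['{']).toNat) = '{' :: u0 := by
          rw [← List.drop_drop]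
          exact hu0.symm
        have hbr? : t[i + (PySem.Chars.find (t.drop i) ['{']).toNat]? = some '{' := by
          have h : (t.drop (i + (PySem.Chars.find (t.drop i) ['{']).toNat))[0]?
              = t[i + (PySem.Chars.find (t.drop i) ['{']).toNat + 0]? := List.getElem?_drop
          rw [hdropbr] at h
          simpa using h.symm
        have hbrl : i + (PySem.Chars.find (t.drop i) ['{']).toNat < t.length := by
          by_contra h
          rw [List.getElem?_eq_none (by omega)] at hbr?
          cases hbr?
        have hkey := closeTable_get t (i + (PySem.Chars.find (t.drop i) ['{']).toNat) hbr?
        have hkle : innerA (t.drop (i + (PySem.Chars.find (t.drop i) ['{']).toNat + 1)) 1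
            ≤ t.length - (i + (PySem.Chars.find (t.drop i) ['{']).toNat + 1) := by
          have := innerA_le (t.drop (i + (PySem.Chars.find (t.drop i) ['{']).toNat + 1)) 1
          rw [List.length_drop] at this
          exact this
        have hne : t.drop i ≠ [] := by
          intro h
          have := congrArg List.length h
          simp at this
          omega
        rw [goB, dif_neg hf, transformA, dif_neg hne, if_neg hf]
        simp only [hkey, Option.getD_some]
        set fN := (PySem.Chars.find (t.drop i) ['{']).toNat with hfN
        have hu : List.drop (fN + 1) (List.drop i t) = List.drop (i + fN + 1) t := by
          rw [List.drop_drop, Nat.add_assoc]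
        rw [hu]
        set kk := innerA (List.drop (i + fN + 1) t) 1 with hkkdef
        have hctoNat : ((↑(i + fN) + (↑kk : Int)).toNat) = i + fN + kk := by omega
        rw [hctoNat]
        have h1sel : List.drop i (List.take (i + fN) t) = List.take fN (List.drop i t) := by
          rw [List.drop_take]
          congr 1
          omega
        have hbody : List.drop (i + fN + 1) (List.take (i + fN + kk) t)
            = List.take (kk - 1) (List.drop (i + fN + 1) t) := by
          rw [List.drop_take]
          congr 1
          omega
        have hblen : (List.take (kk - 1) (List.drop (i + fN + 1) t)).length ≤ N := by
          simp only [List.length_take, List.length_drop]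
          omega
        have hrec : goB (List.take (kk - 1) (List.drop (i + fN + 1) t)) 0
            = transformA (List.take (kk - 1) (List.drop (i + fN + 1) t)) := by
          have h := ihN (List.take (kk - 1) (List.drop (i + fN + 1) t)) hblen
            (List.take (kk - 1) (List.drop (i + fN + 1) t)).length 0 (by omega)
          rwa [List.drop_zero] at h
        have hcont : goB t (i + fN + kk + 1)
            = transformA (List.drop kk (List.drop (i + fN + 1) t)) := by
          rw [List.drop_drop, Nat.add_assoc]
          have he : i + fN + 1 + kk = i + fN + kk + 1 := by omega
          rw [he]
          exact ihk (i + fN + kk + 1) (by omega)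
        rw [h1sel, hbody, hrec, hcont, expand_fold_eq, List.nil_append]

-- ===== VERDICT (by name: the statement is the Claim_ definition above) =====
theorem transform_spec : Claim_equal_transform := by
  intro css _
  unfold Spec_transform transform transform_alt
  rw [goB_eq css.toList.length css.toList le_rfl css.toList.length 0 (by omega)]
  simp
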